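-- pv_equiv track=rewrite | github.com/xftxyz2001/adtest | refueling.py | refueling
-- ===== SOURCE A (Python) =====
-- def refueling(ss, n):  # ss到下个站的距离集，n为汽油箱的容量（距离计）
--     if max(ss) > n:
--         return -1
--     cs = 0  # 当前行驶距离
--     cnt = 0  # 加油次数
--     for s in ss:
--         cs += s
--         if cs > n:
--             cs = s
--             cnt += 1
--     return cnt
-- ===== SOURCE B (Python) =====
-- def refueling(ss, n):
--     if max(ss) > n:
--         return -1
--     # stage 1: prefix sums of the distances
--     pre = [0]
--     for s in ss:
--         pre.append(pre[-1] + s)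
--     # stage 2: jump from station to station by binary search on the prefix sums:
--     # from position i the tank reaches the largest j with pre[j] - pre[i] <= n
--     m = len(ss)
--     i = 0
--     cnt = -1
--     while i < m:
--         lo, hi = i + 1, m
--         while lo < hi:
--             mid = (lo + hi + 1) // 2
--             if pre[mid] - pre[i] <= n:
--                 lo = mid
--             else:
--                 hi = mid - 1
--         i = lo
--         cnt += 1
--     return cnt
-- ===== Notes on version B (the rewrite author's own statement) =====
-- stated objective: alternative
-- what changed: Replaces the running-sum greedy fold by a two-stage algorithm: first build the prefix-sum array, then jump from station to station by binary search for the farthest prefix sum reachable with a full tank, counting the jumps.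
-- outside the precondition, e.g. on refueling([], 5): A raises ValueError, B raises ValueError; on refueling([1, 1, -3, -3], 1): A returns 1, B returns 0
import Mathlib
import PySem

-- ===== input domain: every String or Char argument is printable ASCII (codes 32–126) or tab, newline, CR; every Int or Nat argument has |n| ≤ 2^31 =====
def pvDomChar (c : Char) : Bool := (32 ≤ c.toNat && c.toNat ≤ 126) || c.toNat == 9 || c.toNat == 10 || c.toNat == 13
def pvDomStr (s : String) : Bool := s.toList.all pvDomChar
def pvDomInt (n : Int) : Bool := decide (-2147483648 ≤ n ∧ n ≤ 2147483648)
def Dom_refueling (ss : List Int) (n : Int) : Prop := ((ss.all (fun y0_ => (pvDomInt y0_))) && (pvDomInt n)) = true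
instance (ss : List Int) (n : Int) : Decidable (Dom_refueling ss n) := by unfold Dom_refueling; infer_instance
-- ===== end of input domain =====

-- B replaces A's running-sum greedy fold by a two-stage algorithm: build the prefix-sum
-- array, then jump from station to station by binary search for the farthest prefix sum
-- reachable on a full tank, counting the jumps (an alternative algorithm, not claimed faster).
-- Pre_ restricts to the task's natural domain: a nonempty list (A's max raises ValueError on [])
-- of nonnegative distances (binary search needs monotone prefix sums; negative "distances" are
-- outside the task's natural domain).


-- ===== PORT A =====
def refueling (ss : List Int) (n : Int) : Int :=
  match PySem.List.max? ss (fun y => y) with      -- max(ss); none = ValueError on []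
  | none => 0                                     -- unreachable under Pre_refueling
  | some m =>
    if m > n then -1
    else
      (ss.foldl (fun (p : Int × Int) s =>
        let cs := p.1 + s
        if cs > n then (s, p.2 + 1) else (cs, p.2)) (0, 0)).2

-- ===== PORT B =====
-- stage 1: pre = [0]; for s in ss: pre.append(pre[-1] + s)
def pvBuildPre (ss : List Int) : List Int :=
  ss.foldl (fun pre s => pre ++ [(PySem.List.pyGet? pre (-1)).getD 0 + s]) [0]

-- inner while: binary search for the largest j in [lo, hi] with pre[j] - base <= n.
-- (indices are the nonnegative loop counters of Source B, kept as Nat; pre[mid] is always in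
-- range; fuel is a totalization guard — each iteration shrinks hi - lo, so fuel = hi - lo
-- at the call site is always enough)
def pvBis (pre : List Int) (base n : Int) : Nat → Nat → Nat → Nat
  | 0, lo, _ => lo
  | fuel + 1, lo, hi =>
    if lo < hi then
      let mid := (lo + hi + 1) / 2
      if pre.getD mid 0 - base ≤ n then pvBis pre base n fuel mid hi
      else pvBis pre base n fuel lo (mid - 1)
    else lo

-- outer while: jump i to the binary-search result, count the jumps into cnt
-- (fuel totalization guard again: i strictly increases, so fuel = m - i is always enough)
def pvJump (pre : List Int) (n : Int) : Nat → Nat → Nat → Int → Int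
  | 0, _, _, cnt => cnt
  | fuel + 1, m, i, cnt =>
    if i < m then
      pvJump pre n fuel m (pvBis pre (pre.getD i 0) n (m - (i + 1)) (i + 1) m) (cnt + 1)
    else cnt

def refueling_alt (ss : List Int) (n : Int) : Int :=
  match PySem.List.max? ss (fun y => y) with      -- max(ss); none = ValueError on []
  | none => 0                                     -- unreachable under Pre_refueling
  | some mx =>
    if mx > n then -1
    else pvJump (pvBuildPre ss) n ss.length ss.length 0 (-1)

-- ===== PRECONDITION & SPEC =====
-- Pre_ excludes the empty list, on which A's (and B's) max(ss) raises ValueError, and lists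
-- containing a negative "distance", outside the task's natural domain (there A's reset greedy
-- and B's binary search on the then non-monotone prefix sums can disagree).
def Pre_refueling (ss : List Int) (n : Int) : Prop := ss ≠ [] ∧ ∀ x ∈ ss, 0 ≤ x
instance (ss : List Int) (n : Int) : Decidable (Pre_refueling ss n) := by unfold Pre_refueling; infer_instance
def pvWitness_refueling : List Int × Int := ([3, 1, 2], 4)

def Spec_refueling (ss : List Int) (n : Int) (out : Int) : Prop := out = refueling_alt ss n
instance (ss : List Int) (n : Int) (out : Int) : Decidable (Spec_refueling ss n out) := by unfold Spec_refueling; infer_instance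

-- ===== CLAIM (what is proved, stated in full; the proofs are below) =====
def Claim_equal_refueling : Prop := ∀ (ss : List Int) (n : Int), Dom_refueling ss n → Pre_refueling ss n → Spec_refueling ss n (refueling ss n)

-- ===== LEMMAS AND PROOFS =====

-- reference greedy (proof-side): maximal groups, as a structural recursion
def pvBInner (n cur : Int) : List Int → Int × List Int
  | [] => (cur, [])
  | x :: rest => if cur + x ≤ n then pvBInner n (cur + x) rest else (cur, x :: rest)

theorem pvBInner_len (n cur : Int) (l : List Int) : (pvBInner n cur l).2.length ≤ l.length := by
  induction l generalizing cur with
  | nil => simp [pvBInner]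
  | cons x rest ih =>
    simp only [pvBInner]
    split
    · exact le_trans (ih _) (Nat.le_succ _)
    · simp

def pvBOuter (n : Int) : List Int → Int → Int
  | [], groups => groups
  | x :: rest, groups => pvBOuter n (pvBInner n x rest).2 (groups + 1)
termination_by l _ => l.length
decreasing_by simpa using Nat.lt_succ_of_le (pvBInner_len n x rest)

-- A's fold continued from state (cur, cnt) equals the grouping run mid-group
theorem pvKey (n : Int) (l : List Int) (cur cnt : Int) :
    (l.foldl (fun (p : Int × Int) s =>
        if p.1 + s > n then (s, p.2 + 1) else (p.1 + s, p.2)) (cur, cnt)).2 + 1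
      = pvBOuter n (pvBInner n cur l).2 (cnt + 1) := by
  induction l generalizing cur cnt with
  | nil => simp [pvBInner, pvBOuter]
  | cons x rest ih =>
    by_cases h : cur + x ≤ n
    · have hnot : ¬ cur + x > n := by omega
      simp only [List.foldl_cons, pvBInner, if_pos h, if_neg hnot]
      exact ih (cur + x) cnt
    · have hgt : cur + x > n := by omega
      simp only [List.foldl_cons, pvBInner, if_neg h, if_pos hgt, pvBOuter]
      exact ih x (cnt + 1)

theorem pvBOuter_shift (n : Int) : ∀ (l : List Int) (g : Int),
    pvBOuter n l g = pvBOuter n l 0 + g := by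
  intro l
  induction hL : l.length using Nat.strong_induction_on generalizing l with
  | _ L ih =>
    intro g
    cases l with
    | nil => simp [pvBOuter]
    | cons x rest =>
      have hlen : (pvBInner n x rest).2.length < L := by
        have := pvBInner_len n x rest; simp at hL; omega
      simp only [pvBOuter]
      rw [ih _ hlen _ rfl (g + 1), ih _ hlen _ rfl (0 + 1)]
      ring

-- prefix sums, proof-side characterisation of pvBuildPre
def pvScan (c : Int) : List Int → List Int
  | [] => []
  | x :: t => (c + x) :: pvScan (c + x) t

theorem pvBuild_loop (l : List Int) : ∀ (acc : List Int) (c : Int) (h : acc ≠ []),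
    acc.getLast h = c →
    l.foldl (fun pre s => pre ++ [(PySem.List.pyGet? pre (-1)).getD 0 + s]) acc
      = acc ++ pvScan c l := by
  induction l with
  | nil => intro acc c h _; simp [pvScan]
  | cons x t ih =>
    intro acc c h hc
    have hget : (PySem.List.pyGet? acc (-1)).getD 0 = c := by
      rw [PySem.List.pyGet?_neg_one, List.getLast?_eq_getLast_of_ne_nil h, hc]
      rfl
    simp only [List.foldl_cons, hget]
    rw [ih (acc ++ [c + x]) (c + x) (by simp) (by simp)]
    simp [pvScan]

theorem pvScan_length (c : Int) (l : List Int) : (pvScan c l).length = l.length := by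
  induction l generalizing c with
  | nil => rfl
  | cons x t ih => simp [pvScan, ih]

theorem pvScan_getElem (l : List Int) : ∀ (c : Int) (k : Nat) (h : k < l.length),
    (pvScan c l)[k]'(by rw [pvScan_length]; exact h) = c + (l.take (k + 1)).sum := by
  induction l with
  | nil => intro c k h; simp at h
  | cons x t ih =>
    intro c k h
    cases k with
    | zero => simp [pvScan]
    | succ k =>
      have ht : k < t.length := by simp at h; omega
      simp only [pvScan, List.getElem_cons_succ, List.take_succ_cons, List.sum_cons]
      rw [ih (c + x) k ht]
      ring

theorem pvBuildPre_getD (ss : List Int) (j : Nat) (hj : j ≤ ss.length) :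
    (pvBuildPre ss).getD j 0 = (ss.take j).sum := by
  have hpre : pvBuildPre ss = 0 :: pvScan 0 ss := by
    unfold pvBuildPre
    rw [pvBuild_loop ss [0] 0 (by simp) (by simp)]
    rfl
  rw [hpre]
  cases j with
  | zero => simp
  | succ k =>
    have hk : k < ss.length := by omega
    have hlt : k < (pvScan 0 ss).length := by rw [pvScan_length]; exact hk
    rw [List.getD_cons_succ]
    rw [List.getD_eq_getElem _ _ hlt]
    rw [pvScan_getElem ss 0 k hk]
    ring

-- sums of takes are monotone when all elements are nonnegative
theorem pvSum_nonneg (l : List Int) (h : ∀ x ∈ l, 0 ≤ x) : 0 ≤ l.sum := by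
  induction l with
  | nil => simp
  | cons x t ih =>
    simp only [List.sum_cons]
    have := h x (by simp)
    have := ih (fun y hy => h y (by simp [hy]))
    omega

theorem pvTake_mono (ss : List Int) (hpos : ∀ x ∈ ss, 0 ≤ x) (j k : Nat) (hjk : j ≤ k) :
    (ss.take j).sum ≤ (ss.take k).sum := by
  have hk : k = j + (k - j) := by omega
  rw [hk, List.take_add, List.sum_append]
  have : 0 ≤ (((ss.drop j).take (k - j))).sum := by
    refine pvSum_nonneg _ (fun x hx => hpos x ?_)
    exact List.mem_of_mem_drop (List.mem_of_mem_take hx)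
  omega

theorem pvTake_succ_sum (ss : List Int) (i : Nat) (h : i < ss.length) :
    (ss.take (i + 1)).sum = (ss.take i).sum + ss[i] := by
  rw [List.take_add_one, List.sum_append, List.getElem?_eq_getElem h]
  simp

theorem pvSplit_sum (ss : List Int) (i k : Nat) (h : i < ss.length) :
    (ss.take (i + 1 + k)).sum = (ss.take i).sum + ss[i] + ((ss.drop (i + 1)).take k).sum := by
  rw [List.take_add, List.sum_append, pvTake_succ_sum ss i h]

-- binary search specification
theorem pvBis_spec (pre : List Int) (base n : Int) (M : Nat)
    (hmono : ∀ j k : Nat, j ≤ k → k ≤ M → pre.getD j 0 ≤ pre.getD k 0) :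
    ∀ (fuel lo hi : Nat), hi - lo ≤ fuel → lo ≤ hi → hi ≤ M → pre.getD lo 0 - base ≤ n →
    (∀ j : Nat, hi < j → j ≤ M → n < pre.getD j 0 - base) →
    (pre.getD (pvBis pre base n fuel lo hi) 0 - base ≤ n) ∧ lo ≤ pvBis pre base n fuel lo hi ∧
      pvBis pre base n fuel lo hi ≤ hi ∧
      (∀ j : Nat, pvBis pre base n fuel lo hi < j → j ≤ M → n < pre.getD j 0 - base) := by
  intro fuel
  induction fuel with
  | zero =>
    intro lo hi hfuel hlohi hhiM hPlo htop
    have hlh : lo = hi := by omega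
    simp only [pvBis]
    exact ⟨hPlo, le_refl _, hlohi, by intro j hj hjM; exact htop j (by omega) hjM⟩
  | succ fuel ih =>
    intro lo hi hfuel hlohi hhiM hPlo htop
    rw [pvBis]
    by_cases hlt : lo < hi
    · rw [if_pos hlt]
      have hmid1 : lo < (lo + hi + 1) / 2 := by omega
      have hmid2 : (lo + hi + 1) / 2 ≤ hi := by omega
      by_cases hP : pre.getD ((lo + hi + 1) / 2) 0 - base ≤ n
      · rw [if_pos hP]
        have := ih ((lo + hi + 1) / 2) hi (by omega) hmid2 hhiM hP htop
        exact ⟨this.1, by omega, this.2.2⟩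
      · rw [if_neg hP]
        have htop' : ∀ j : Nat, (lo + hi + 1) / 2 - 1 < j → j ≤ M → n < pre.getD j 0 - base := by
          intro j hj hjM
          by_cases hjhi : hi < j
          · exact htop j hjhi hjM
          · have hmj : (lo + hi + 1) / 2 ≤ j := by omega
            have := hmono ((lo + hi + 1) / 2) j hmj hjM
            omega
        have := ih lo ((lo + hi + 1) / 2 - 1) (by omega) (by omega) (by omega) hPlo htop'
        exact ⟨this.1, this.2.1, by omega, this.2.2.2⟩
    · rw [if_neg hlt]
      have : lo = hi := by omega
      exact ⟨hPlo, le_refl _, hlohi, by intro j hj hjM; exact htop j (by omega) hjM⟩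

-- characterisation of the greedy inner group
theorem pvInner_char (n : Int) (l : List Int) : ∀ (cur : Int), cur ≤ n →
    ∃ k : Nat, k ≤ l.length ∧ (pvBInner n cur l).2 = l.drop k ∧
      cur + (l.take k).sum ≤ n ∧ (k = l.length ∨ n < cur + (l.take (k + 1)).sum) := by
  induction l with
  | nil => intro cur hcur; exact ⟨0, by simp, by simp [pvBInner], by simpa, Or.inl rfl⟩
  | cons x t ih =>
    intro cur hcur
    by_cases h : cur + x ≤ n
    · obtain ⟨k, hk, hdrop, hsum, hlast⟩ := ih (cur + x) h
      refine ⟨k + 1, by simp; omega, ?_, ?_, ?_⟩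
      · simp only [pvBInner, if_pos h, List.drop_succ_cons]; exact hdrop
      · simp only [List.take_succ_cons, List.sum_cons]; omega
      · rcases hlast with h1 | h1
        · exact Or.inl (by simp [h1])
        · exact Or.inr (by simp only [List.take_succ_cons, List.sum_cons]; omega)
    · refine ⟨0, by simp, ?_, by simpa, Or.inr ?_⟩
      · simp [pvBInner, if_neg h]
      · simp; omega

-- the jump step: binary search lands exactly where the greedy group ends
theorem pvStep (ss : List Int) (n : Int) (hpos : ∀ x ∈ ss, 0 ≤ x) (hle : ∀ x ∈ ss, x ≤ n)
    (i : Nat) (hi : i < ss.length) :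
    i + 1 ≤ pvBis (pvBuildPre ss) ((pvBuildPre ss).getD i 0) n (ss.length - (i + 1)) (i + 1) ss.length ∧
    pvBis (pvBuildPre ss) ((pvBuildPre ss).getD i 0) n (ss.length - (i + 1)) (i + 1) ss.length ≤ ss.length ∧
    ss.drop (pvBis (pvBuildPre ss) ((pvBuildPre ss).getD i 0) n (ss.length - (i + 1)) (i + 1) ss.length)
      = (pvBInner n ss[i] (ss.drop (i + 1))).2 := by
  have hmono : ∀ j k : Nat, j ≤ k → k ≤ ss.length →
      (pvBuildPre ss).getD j 0 ≤ (pvBuildPre ss).getD k 0 := by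
    intro j k hjk hk
    rw [pvBuildPre_getD ss j (by omega), pvBuildPre_getD ss k hk]
    exact pvTake_mono ss hpos j k hjk
  have hbase : (pvBuildPre ss).getD i 0 = (ss.take i).sum := pvBuildPre_getD ss i (by omega)
  have hP1 : (pvBuildPre ss).getD (i + 1) 0 - (pvBuildPre ss).getD i 0 ≤ n := by
    rw [hbase, pvBuildPre_getD ss (i + 1) (by omega), pvTake_succ_sum ss i hi]
    have := hle ss[i] (by exact List.getElem_mem hi)
    omega
  have hspec := pvBis_spec (pvBuildPre ss) ((pvBuildPre ss).getD i 0) n ss.length hmono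
    (ss.length - (i + 1)) (i + 1) ss.length (by omega) (by omega) (le_refl _) hP1
    (by intro j hj hjM; omega)
  set r := pvBis (pvBuildPre ss) ((pvBuildPre ss).getD i 0) n (ss.length - (i + 1)) (i + 1) ss.length with hr
  obtain ⟨hPr, hlor, hrhi, htopr⟩ := hspec
  have hcur : ss[i] ≤ n := hle ss[i] (List.getElem_mem hi)
  obtain ⟨k, hk, hdrop, hsum, hlast⟩ := pvInner_char n (ss.drop (i + 1)) ss[i] hcur
  have hL : (ss.drop (i + 1)).length = ss.length - (i + 1) := by simp
  -- value of the greedy endpoint in terms of prefix sums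
  have hsum' : (ss.take (i + 1 + k)).sum - (ss.take i).sum ≤ n := by
    rw [pvSplit_sum ss i k hi]; omega
  have he : i + 1 + k = r := by
    by_contra hne
    rcases Nat.lt_or_ge (i + 1 + k) r with hlt | hge
    · -- then k < length of the tail, so the (k+1)-st prefix already overflows, contradicting P r
      have hkL : k < (ss.drop (i + 1)).length := by omega
      have hover : n < ss[i] + ((ss.drop (i + 1)).take (k + 1)).sum := by
        rcases hlast with h1 | h1
        · omega
        · exact h1
      have h2 : n < (ss.take (i + 1 + (k + 1))).sum - (ss.take i).sum := by
        rw [pvSplit_sum ss i (k + 1) hi]; omega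
      have hmle := hmono (i + 1 + (k + 1)) r (by omega) (by omega)
      rw [pvBuildPre_getD ss (i + 1 + (k + 1)) (by omega),
          pvBuildPre_getD ss r (by omega)] at hmle
      rw [pvBuildPre_getD ss r (by omega), hbase] at hPr
      omega
    · -- r < i+1+k: the greedy endpoint still fits, contradicting the maximality of r
      have hrk : r < i + 1 + k := by omega
      have := htopr (i + 1 + k) (by omega) (by omega)
      rw [pvBuildPre_getD ss (i + 1 + k) (by omega), hbase] at this
      omega
  refine ⟨hlor, hrhi, ?_⟩
  rw [← he, hdrop, List.drop_drop]

theorem pvJump_eq (ss : List Int) (n : Int) (hpos : ∀ x ∈ ss, 0 ≤ x) (hle : ∀ x ∈ ss, x ≤ n) :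
    ∀ (fuel i : Nat) (cnt : Int), ss.length - i ≤ fuel →
      pvJump (pvBuildPre ss) n fuel ss.length i cnt = pvBOuter n (ss.drop i) cnt := by
  intro fuel
  induction fuel with
  | zero =>
    intro i cnt h
    rw [pvJump]
    rw [List.drop_eq_nil_of_le (by omega)]
    simp [pvBOuter]
  | succ fuel ih =>
    intro i cnt h
    by_cases hi : i < ss.length
    · rw [pvJump, if_pos hi]
      obtain ⟨h1, h2, h3⟩ := pvStep ss n hpos hle i hi
      rw [ih _ (cnt + 1) (by omega)]
      rw [List.drop_eq_getElem_cons hi]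
      simp only [pvBOuter]
      rw [h3]
    · rw [pvJump, if_neg hi]
      rw [List.drop_eq_nil_of_le (by omega)]
      simp [pvBOuter]

-- ===== VERDICT (by name: the statement is the Claim_ definition above) =====
theorem refueling_spec : Claim_equal_refueling := by
  intro ss n _ hpre
  obtain ⟨hne, hpos⟩ := hpre
  unfold Spec_refueling refueling refueling_alt
  match hss : ss with
  | [] => exact absurd rfl hne
  | x :: rest =>
    rw [PySem.List.max?_id_cons]
    by_cases hmn : rest.foldl max x > n
    · simp [hmn]
    · have hle : ∀ y ∈ x :: rest, y ≤ n := by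
        intro y hy
        rcases List.mem_cons.mp hy with h | h
        · have := (PySem.List.le_foldl_max rest x).1; omega
        · have := (PySem.List.le_foldl_max rest x).2 y h; omega
      have hx : x ≤ rest.foldl max x := (PySem.List.le_foldl_max rest x).1
      have hxn : ¬ (x > n) := by omega
      simp only [if_neg hmn, List.foldl_cons, if_neg hxn, zero_add]
      -- A's value: fold.2 = pvBOuter n (x :: rest) 0 - 1
      have hk := pvKey n rest x 0
      rw [zero_add] at hk
      have hA : pvBOuter n (x :: rest) 0 = pvBOuter n (pvBInner n x rest).2 1 := by
        simp [pvBOuter]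
      -- B's value: pvJump … 0 (-1) = pvBOuter n (x :: rest) (-1) = pvBOuter n (x :: rest) 0 - 1
      have hB := pvJump_eq (x :: rest) n
        (by intro y hy; exact hpos y (hss ▸ hy)) hle ((x :: rest).length) 0 (-1) (by omega)
      rw [List.drop_zero] at hB
      rw [hB, pvBOuter_shift n (x :: rest) (-1)]
      omega
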